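-- pv_equiv track=rewrite | github.com/sric0880/quantcalendar | quantcalendar/tools/download_tqsdk.py | _weekends_to_holidays
-- ===== SOURCE A (Python) =====
-- def _weekends_to_holidays(status):
--     all_3 = []
--     for i, s in enumerate(status):
--         if s == 3:
--             all_3.append(i)
--
--     for i in all_3:
--         for j in range(i - 1, -1, -1):
--             if status[j] == 2:
--                 status[j] = 3
--             else:
--                 break
--         for j in range(i + 1, len(status)):
--             if status[j] == 2:
--                 status[j] = 3
--             else:
--                 break
--     return status
-- ===== SOURCE B (Python) =====
-- def _weekends_to_holidays(status):
--     # Pointwise rule: a weekend day (2) becomes a holiday (3) exactly when the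
--     # nearest non-weekend day on its left or right is a holiday (3).
--     n = len(status)
--     res = []
--     for k in range(n):
--         v = status[k]
--         if v == 2:
--             l = k - 1
--             while l >= 0 and status[l] == 2:
--                 l -= 1
--             r = k + 1
--             while r < n and status[r] == 2:
--                 r += 1
--             if (l >= 0 and status[l] == 3) or (r < n and status[r] == 3):
--                 v = 3
--         res.append(v)
--     status[:] = res
--     return status
-- ===== Notes on version B (the rewrite author's own statement) =====
-- stated objective: alternative
-- what changed: Instead of indexing all 3s and mutating outward through each adjacent 2-run, B computes each output element independently by a pointwise rule (a 2 becomes 3 iff its nearest non-2 neighbour on either side is a 3) building a fresh list, then assigns it in place.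
import Mathlib
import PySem

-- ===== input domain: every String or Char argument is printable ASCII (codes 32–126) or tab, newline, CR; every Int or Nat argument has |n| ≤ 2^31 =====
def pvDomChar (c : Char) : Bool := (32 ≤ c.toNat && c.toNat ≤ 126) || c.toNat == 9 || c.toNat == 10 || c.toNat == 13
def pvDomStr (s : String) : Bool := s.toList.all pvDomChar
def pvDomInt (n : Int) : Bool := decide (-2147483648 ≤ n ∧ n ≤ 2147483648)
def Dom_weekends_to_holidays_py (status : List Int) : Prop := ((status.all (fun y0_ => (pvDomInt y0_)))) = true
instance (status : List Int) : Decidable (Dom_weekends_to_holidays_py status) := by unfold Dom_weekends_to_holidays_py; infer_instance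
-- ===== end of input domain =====

-- B replaces A's "collect 3-indices, then mutate outward through 2-runs" with a pointwise
-- rule computed per element (a 2 becomes 3 iff its nearest non-2 neighbour is a 3);
-- both Pythons mutate `status` in place to the same final content, equivalence here is on the returned value.

-- ===== PORT A =====
-- inner loop `for j in range(i-1,-1,-1): if status[j]==2: status[j]=3 else break`
def expL (s : List Int) (j : Nat) : List Int :=
  if s.getD j 0 = 2 then
    match j with
    | 0 => s.set 0 3
    | Nat.succ j' => expL (s.set (j'+1) 3) j'
  else s

-- `range(i-1,-1,-1)` is empty when i = 0, else runs j = i-1 … 0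
def expLstep (st : List Int) (i : Nat) : List Int :=
  match i with
  | 0 => st
  | Nat.succ i' => expL st i'

-- inner loop `for j in range(i+1, len(status)): if status[j]==2: status[j]=3 else break`
def expR (s : List Int) (j : Nat) : List Int :=
  if h : j < s.length ∧ s.getD j 0 = 2 then expR (s.set j 3) (j+1) else s
termination_by s.length - j
decreasing_by simp [List.length_set]; omega

def weekends_to_holidays_py (status : List Int) : List Int :=
  let all3 := (List.range status.length).filter (fun i => status.getD i 0 == 3)
  all3.foldl (fun st i => expR (expLstep st i) (i+1)) status

-- ===== PORT B =====
-- `while l >= 0 and status[l] == 2: l -= 1`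
def findL (s : List Int) (l : Int) : Int :=
  if h : 0 ≤ l ∧ s.getD l.toNat 0 = 2 then findL s (l-1) else l
termination_by (l+1).toNat
decreasing_by omega

-- `while r < n and status[r] == 2: r += 1`
def findR (s : List Int) (r : Nat) : Nat :=
  if h : r < s.length ∧ s.getD r 0 = 2 then findR s (r+1) else r
termination_by s.length - r
decreasing_by omega

def weekends_to_holidays_py_alt (status : List Int) : List Int :=
  (List.range status.length).map (fun k =>
    let v := status.getD k 0
    if v = 2 then
      let l := findL status ((k : Int) - 1)
      let r := findR status (k+1)
      if (0 ≤ l ∧ status.getD l.toNat 0 = 3) ∨ (r < status.length ∧ status.getD r 0 = 3)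
      then 3 else v
    else v)

-- ===== PRECONDITION & SPEC =====
def Spec_weekends_to_holidays_py (status : List Int) (out : List Int) : Prop := out = weekends_to_holidays_py_alt status
instance (status : List Int) (out : List Int) : Decidable (Spec_weekends_to_holidays_py status out) := by unfold Spec_weekends_to_holidays_py; infer_instance

-- ===== CLAIM (what is proved, stated in full; the proofs are below) =====
def Claim_equal_weekends_to_holidays_py : Prop := ∀ (status : List Int), Dom_weekends_to_holidays_py status → Spec_weekends_to_holidays_py status (weekends_to_holidays_py status)

-- ===== LEMMAS AND PROOFS =====

-- `j is connected to k through 2s`: everything strictly between is 2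
def btw (s : List Int) (a b : Nat) : Prop := ∀ m, a < m → m < b → s.getD m 0 = 2

def connTo (s : List Int) (j k : Nat) : Prop :=
  s.getD k 0 = 2 ∧ s.getD j 0 = 3 ∧ j < s.length ∧
    ((j < k ∧ btw s j k) ∨ (k < j ∧ btw s k j))

def connS (s : List Int) (S : List Nat) (k : Nat) : Prop := ∃ j ∈ S, connTo s j k

def StInv (s st : List Int) (S : List Nat) : Prop :=
  st.length = s.length ∧
  ∀ k, (connS s S k → st.getD k 0 = 3) ∧ (¬ connS s S k → st.getD k 0 = s.getD k 0)

lemma getD_set_self (s : List Int) (j : Nat) (hj : j < s.length) (v : Int) :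
    (s.set j v).getD j 0 = v := by
  simp [List.getD_eq_getElem?_getD, hj]

lemma getD_set_ne (s : List Int) (j k : Nat) (v : Int) (h : j ≠ k) :
    (s.set j v).getD k 0 = s.getD k 0 := by
  simp [List.getD_eq_getElem?_getD, List.getElem?_set_ne h]

lemma getD_lt_length (s : List Int) (k : Nat) (h : s.getD k 0 = 2) : k < s.length := by
  by_contra hk
  simp [List.getD_eq_getElem?_getD, List.getElem?_eq_none (by omega : s.length ≤ k)] at h

lemma expL_length (s : List Int) (j : Nat) : (expL s j).length = s.length := by
  induction j generalizing s with
  | zero => unfold expL; split <;> simp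
  | succ j' ih => unfold expL; split <;> simp [ih]

lemma expL_getD (s : List Int) (j k : Nat) :
    ((k ≤ j ∧ ∀ m, k ≤ m → m ≤ j → s.getD m 0 = 2) → (expL s j).getD k 0 = 3)
    ∧ (¬ (k ≤ j ∧ ∀ m, k ≤ m → m ≤ j → s.getD m 0 = 2) → (expL s j).getD k 0 = s.getD k 0) := by
  induction j generalizing s with
  | zero =>
    unfold expL
    by_cases h : s.getD 0 0 = 2
    · rw [if_pos h]
      constructor
      · rintro ⟨hk0, -⟩
        have hk : k = 0 := by omega
        subst hk
        exact getD_set_self s 0 (getD_lt_length s 0 h) 3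
      · intro hnc
        have hk : k ≠ 0 := by
          intro hk; subst hk
          exact hnc ⟨le_refl 0, fun m hm1 hm2 => by have hm : m = 0 := (by omega); subst hm; exact h⟩
        exact getD_set_ne s 0 k 3 (fun e => hk e.symm)
    · rw [if_neg h]
      refine ⟨?_, fun _ => rfl⟩
      rintro ⟨hk0, hall⟩
      have hk : k = 0 := by omega
      subst hk
      exact absurd (hall 0 le_rfl le_rfl) h
  | succ j' ih =>
    unfold expL
    by_cases h : s.getD (j'+1) 0 = 2
    · rw [if_pos h]
      have hlen : j' + 1 < s.length := getD_lt_length s _ h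
      have ihs := ih (s.set (j'+1) 3)
      constructor
      · rintro ⟨hkj, hall⟩
        by_cases hk : k ≤ j'
        · apply ihs.1
          refine ⟨hk, fun m hm1 hm2 => ?_⟩
          rw [getD_set_ne s (j'+1) m 3 (by omega)]
          exact hall m hm1 (by omega)
        · have hkk : k = j'+1 := by omega
          subst hkk
          rw [ihs.2 (by rintro ⟨h1, -⟩; omega)]
          exact getD_set_self s (j'+1) hlen 3
      · intro hnc
        have hk1 : ¬(k ≤ j' ∧ ∀ m, k ≤ m → m ≤ j' → (s.set (j'+1) 3).getD m 0 = 2) := by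
          rintro ⟨hkj, hall⟩
          apply hnc
          refine ⟨by omega, fun m hm1 hm2 => ?_⟩
          by_cases hmj : m ≤ j'
          · have := hall m hm1 hmj
            rwa [getD_set_ne s (j'+1) m 3 (by omega)] at this
          · have hme : m = j'+1 := by omega
            subst hme; exact h
        rw [ihs.2 hk1]
        have hk2 : k ≠ j'+1 := by
          intro e; subst e
          exact hnc ⟨le_refl _, fun m hm1 hm2 => by have hm : m = j'+1 := (by omega); subst hm; exact h⟩
        exact getD_set_ne s (j'+1) k 3 (fun e => hk2 e.symm)
    · rw [if_neg h]
      refine ⟨?_, fun _ => rfl⟩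
      rintro ⟨hkj, hall⟩
      exact absurd (hall (j'+1) (by omega) le_rfl) h

lemma expR_length (s : List Int) (j : Nat) : (expR s j).length = s.length := by
  induction s, j using expR.induct with
  | case1 s j h ih => rw [expR, dif_pos h]; simpa using ih
  | case2 s j h => rw [expR, dif_neg h]

lemma expR_getD (s : List Int) (j : Nat) : ∀ k : Nat,
    ((j ≤ k ∧ ∀ m, j ≤ m → m ≤ k → s.getD m 0 = 2) → (expR s j).getD k 0 = 3)
    ∧ (¬ (j ≤ k ∧ ∀ m, j ≤ m → m ≤ k → s.getD m 0 = 2) → (expR s j).getD k 0 = s.getD k 0) := by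
  induction s, j using expR.induct with
  | case1 s j h ih =>
    intro k
    have ih := ih k
    rw [expR, dif_pos h]
    constructor
    · rintro ⟨hjk, hall⟩
      by_cases hk : j+1 ≤ k
      · apply ih.1
        refine ⟨hk, fun m hm1 hm2 => ?_⟩
        rw [getD_set_ne s j m 3 (by omega)]
        exact hall m (by omega) hm2
      · have hkk : k = j := by omega
        subst hkk
        rw [ih.2 (by rintro ⟨h1, -⟩; omega)]
        exact getD_set_self _ _ h.1 3
    · intro hnc
      have hk1 : ¬(j+1 ≤ k ∧ ∀ m, j+1 ≤ m → m ≤ k → (s.set j 3).getD m 0 = 2) := by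
        rintro ⟨hjk, hall⟩
        apply hnc
        refine ⟨by omega, fun m hm1 hm2 => ?_⟩
        by_cases hmj : m = j
        · subst hmj; exact h.2
        · have := hall m (by omega) hm2
          rwa [getD_set_ne s j m 3 (fun e => hmj e.symm)] at this
      rw [ih.2 hk1]
      have hk2 : k ≠ j := by
        intro e; subst e
        exact hnc ⟨le_rfl, fun m hm1 hm2 => by have hm : m = k := (by omega); subst hm; exact h.2⟩
      exact getD_set_ne s j k 3 (fun e => hk2 e.symm)
  | case2 s j h =>
    intro k
    rw [expR, dif_neg h]
    refine ⟨?_, fun _ => rfl⟩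
    rintro ⟨hjk, hall⟩
    have h2 : s.getD j 0 = 2 := hall j le_rfl hjk
    exact absurd ⟨getD_lt_length s j h2, h2⟩ h

lemma findL_spec (s : List Int) (t : Int) :
    findL s t ≤ t ∧ (0 ≤ findL s t → s.getD (findL s t).toNat 0 ≠ 2)
    ∧ (∀ m : Int, 0 ≤ m → findL s t < m → m ≤ t → s.getD m.toNat 0 = 2) := by
  induction t using findL.induct (s := s) with
  | case1 t h ih =>
    rw [findL, dif_pos h]
    refine ⟨by have := ih.1; omega, ih.2.1, fun m hm0 hm1 hm2 => ?_⟩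
    by_cases hmt : m ≤ t - 1
    · exact ih.2.2 m hm0 hm1 hmt
    · have hme : m = t := by omega
      subst hme; exact h.2
  | case2 t h =>
    rw [findL, dif_neg h]
    refine ⟨le_rfl, fun h0 h2 => h ⟨h0, h2⟩, fun m hm0 hm1 hm2 => by omega⟩

lemma findR_spec (s : List Int) (t : Nat) :
    t ≤ findR s t ∧ (findR s t < s.length → s.getD (findR s t) 0 ≠ 2)
    ∧ (∀ m : Nat, t ≤ m → m < findR s t → s.getD m 0 = 2) := by
  induction t using findR.induct (s := s) with
  | case1 t h ih =>
    rw [findR, dif_pos h]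
    refine ⟨by have := ih.1; omega, ih.2.1, fun m hm1 hm2 => ?_⟩
    by_cases hmt : t + 1 ≤ m
    · exact ih.2.2 m hmt hm2
    · have hme : m = t := by omega
      subst hme; exact h.2
  | case2 t h =>
    rw [findR, dif_neg h]
    refine ⟨le_rfl, fun h0 h2 => h ⟨h0, h2⟩, fun m hm1 hm2 => by omega⟩

-- if m is connected to a 3 of S and the whole segment between m and k is 2, so is k
lemma connS_shift (s : List Int) (S : List Nat) (m k : Nat)
    (hm : connS s S m)
    (hall : ∀ t, (m ≤ t ∧ t ≤ k) ∨ (k ≤ t ∧ t ≤ m) → s.getD t 0 = 2) :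
    connS s S k := by
  obtain ⟨j, hjS, hm2, hj3, hjlen, hd⟩ := hm
  have hk2 : s.getD k 0 = 2 := hall k (by omega)
  have hjout : ¬((m ≤ j ∧ j ≤ k) ∨ (k ≤ j ∧ j ≤ m)) := by
    intro hmem; have := hall j hmem; omega
  refine ⟨j, hjS, hk2, hj3, hjlen, ?_⟩
  rcases hd with ⟨hjm, hb⟩ | ⟨hmj, hb⟩
  · have hjk : j < k := by omega
    refine Or.inl ⟨hjk, fun u hu1 hu2 => ?_⟩
    by_cases hum : u < m
    · exact hb u hu1 hum
    · exact hall u (by omega)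
  · have hjk : k < j := by omega
    refine Or.inr ⟨hjk, fun u hu1 hu2 => ?_⟩
    by_cases hum : m < u
    · exact hb u hum hu2
    · exact hall u (by omega)

-- step lemma: processing one 3-index preserves the invariant
lemma step_inv (s st : List Int) (S : List Nat) (i : Nat)
    (hInv : StInv s st S) (hi : i < s.length) (h3 : s.getD i 0 = 3) :
    StInv s (expR (expLstep st i) (i+1)) (i :: S) := by
  obtain ⟨hstlen, hpt⟩ := hInv
  have hof2 : ∀ m, st.getD m 0 = 2 → s.getD m 0 = 2 ∧ ¬ connS s S m := by
    intro m hm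
    by_cases hc : connS s S m
    · have := (hpt m).1 hc; omega
    · rw [(hpt m).2 hc] at hm; exact ⟨hm, hc⟩
  have h2of : ∀ m, s.getD m 0 = 2 → ¬ connS s S m → st.getD m 0 = 2 := by
    intro m hm hc; rw [(hpt m).2 hc]; exact hm
  -- element description of expLstep st i
  have hst1len : (expLstep st i).length = st.length := by
    cases i with
    | zero => rfl
    | succ i' => exact expL_length st i'
  have hst1 : ∀ k, ((k < i ∧ ∀ m, k ≤ m → m < i → st.getD m 0 = 2) → (expLstep st i).getD k 0 = 3)
      ∧ (¬(k < i ∧ ∀ m, k ≤ m → m < i → st.getD m 0 = 2) → (expLstep st i).getD k 0 = st.getD k 0) := by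
    intro k
    cases i with
    | zero => exact ⟨fun hc => absurd hc.1 (by omega), fun _ => rfl⟩
    | succ i' =>
      have hL := expL_getD st i' k
      constructor
      · rintro ⟨h1, h2⟩
        exact hL.1 ⟨by omega, fun m a b => h2 m a (by omega)⟩
      · intro hnc
        apply hL.2
        rintro ⟨h1, h2⟩
        exact hnc ⟨by omega, fun m a b => h2 m a (by omega)⟩
  have hst1hi : ∀ m, i < m → (expLstep st i).getD m 0 = st.getD m 0 := by
    intro m hm
    exact (hst1 m).2 (by rintro ⟨h1, -⟩; omega)
  -- element description of the whole step
  have hst2 : ∀ k,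
      (((k < i ∧ ∀ m, k ≤ m → m < i → st.getD m 0 = 2) ∨ (i < k ∧ ∀ m, i < m → m ≤ k → st.getD m 0 = 2)) →
        (expR (expLstep st i) (i+1)).getD k 0 = 3)
      ∧ (¬(k < i ∧ ∀ m, k ≤ m → m < i → st.getD m 0 = 2) → ¬(i < k ∧ ∀ m, i < m → m ≤ k → st.getD m 0 = 2) →
        (expR (expLstep st i) (i+1)).getD k 0 = st.getD k 0) := by
    intro k
    have hR := expR_getD (expLstep st i) (i+1) k
    constructor
    · rintro (hL | hRc)
      · rw [hR.2 (by rintro ⟨h1, -⟩; omega)]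
        exact (hst1 k).1 hL
      · apply hR.1
        refine ⟨by omega, fun m hm1 hm2 => ?_⟩
        rw [hst1hi m (by omega)]
        exact hRc.2 m (by omega) hm2
    · intro hnL hnR
      have hnR' : ¬(i+1 ≤ k ∧ ∀ m, i+1 ≤ m → m ≤ k → (expLstep st i).getD m 0 = 2) := by
        rintro ⟨h1, h2⟩
        refine hnR ⟨by omega, fun m a b => ?_⟩
        rw [← hst1hi m (by omega)]
        exact h2 m (by omega) b
      rw [hR.2 hnR']
      exact (hst1 k).2 hnL
  refine ⟨by rw [expR_length, hst1len, hstlen], fun k => ⟨?_, ?_⟩⟩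
  · -- connected to i or to S ⇒ value 3
    rintro ⟨j, hjm, hcj⟩
    rcases List.mem_cons.mp hjm with hji | hjS
    · replace hcj : connTo s i k := hji ▸ hcj
      by_cases hSk : connS s S k
      · have h33 : st.getD k 0 = 3 := (hpt k).1 hSk
        rw [(hst2 k).2 (by rintro ⟨h1, h2⟩; have := h2 k le_rfl h1; omega)
              (by rintro ⟨h1, h2⟩; have := h2 k h1 le_rfl; omega)]
        exact h33
      · obtain ⟨hk2, -, -, hd⟩ := hcj
        rcases hd with ⟨hik, hb⟩ | ⟨hki, hb⟩
        · -- i < k : right expansion reaches k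
          have hseg : ∀ u, i < u → u ≤ k → s.getD u 0 = 2 := by
            intro u hu1 hu2
            by_cases hu : u = k
            · subst hu; exact hk2
            · exact hb u hu1 (by omega)
          apply (hst2 k).1
          refine Or.inr ⟨hik, fun m hm1 hm2 => ?_⟩
          apply h2of m (hseg m hm1 hm2)
          intro hSm
          exact hSk (connS_shift s S m k hSm (fun u hu => hseg u (by omega) (by omega)))
        · -- k < i : left expansion reaches k
          have hseg : ∀ u, k ≤ u → u < i → s.getD u 0 = 2 := by
            intro u hu1 hu2
            by_cases hu : u = k
            · subst hu; exact hk2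
            · exact hb u (by omega) hu2
          apply (hst2 k).1
          refine Or.inl ⟨hki, fun m hm1 hm2 => ?_⟩
          apply h2of m (hseg m hm1 hm2)
          intro hSm
          exact hSk (connS_shift s S m k hSm (fun u hu => hseg u (by omega) (by omega)))
    · have h33 : st.getD k 0 = 3 := (hpt k).1 ⟨j, hjS, hcj⟩
      rw [(hst2 k).2 (by rintro ⟨h1, h2⟩; have := h2 k le_rfl h1; omega)
            (by rintro ⟨h1, h2⟩; have := h2 k h1 le_rfl; omega)]
      exact h33
  · -- not connected ⇒ untouched
    intro hnc
    have hncS : ¬ connS s S k := fun ⟨j, hj, hcj⟩ => hnc ⟨j, List.mem_cons_of_mem _ hj, hcj⟩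
    have hnci : ¬ connTo s i k := fun hc => hnc ⟨i, List.mem_cons_self, hc⟩
    have hnL : ¬(k < i ∧ ∀ m, k ≤ m → m < i → st.getD m 0 = 2) := by
      rintro ⟨hki, hall⟩
      have hk2 : s.getD k 0 = 2 := (hof2 k (hall k le_rfl hki)).1
      exact hnci ⟨hk2, h3, hi, Or.inr ⟨hki, fun m hm1 hm2 => (hof2 m (hall m (by omega) hm2)).1⟩⟩
    have hnR : ¬(i < k ∧ ∀ m, i < m → m ≤ k → st.getD m 0 = 2) := by
      rintro ⟨hik, hall⟩
      have hk2 : s.getD k 0 = 2 := (hof2 k (hall k hik le_rfl)).1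
      exact hnci ⟨hk2, h3, hi, Or.inl ⟨hik, fun m hm1 hm2 => (hof2 m (hall m hm1 (by omega))).1⟩⟩
    rw [(hst2 k).2 hnL hnR]
    exact (hpt k).2 hncS

lemma StInv_perm (s st : List Int) (S S' : List Nat)
    (h : ∀ j, j ∈ S ↔ j ∈ S') (hI : StInv s st S) : StInv s st S' := by
  have hc : ∀ k, connS s S' k ↔ connS s S k := by
    intro k
    exact ⟨fun ⟨j, hj, hcj⟩ => ⟨j, (h j).mpr hj, hcj⟩, fun ⟨j, hj, hcj⟩ => ⟨j, (h j).mp hj, hcj⟩⟩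
  exact ⟨hI.1, fun k => ⟨fun hcS' => (hI.2 k).1 ((hc k).mp hcS'),
    fun hn => (hI.2 k).2 (fun hcS => hn ((hc k).mpr hcS))⟩⟩

lemma foldl_inv (s : List Int) (l : List Nat) :
    ∀ (S : List Nat) (st : List Int), (∀ i ∈ l, i < s.length ∧ s.getD i 0 = 3) →
    StInv s st S → StInv s (l.foldl (fun st i => expR (expLstep st i) (i+1)) st) (S ++ l) := by
  induction l with
  | nil => intro S st _ hI; simpa using hI
  | cons i l' ih =>
    intro S st hl hI
    have h1 := step_inv s st S i hI (hl i List.mem_cons_self).1 (hl i List.mem_cons_self).2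
    have h2 := StInv_perm s _ (i :: S) (S ++ [i])
      (by intro j; simp [List.mem_append, List.mem_cons]; tauto) h1
    have h3 := ih (S ++ [i]) _ (fun i' hi' => hl i' (List.mem_cons_of_mem _ hi')) h2
    simpa [List.append_assoc] using h3

lemma mem_all3 (s : List Int) (j : Nat) :
    j ∈ (List.range s.length).filter (fun i => s.getD i 0 == 3) ↔ j < s.length ∧ s.getD j 0 = 3 := by
  simp [List.mem_filter, List.mem_range, beq_iff_eq]

lemma A_inv (s : List Int) :
    StInv s (weekends_to_holidays_py s) ((List.range s.length).filter (fun i => s.getD i 0 == 3)) := by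
  have hbase : StInv s s [] := by
    refine ⟨rfl, fun k => ⟨?_, fun _ => rfl⟩⟩
    rintro ⟨j, hj, -⟩
    exact absurd hj (List.not_mem_nil)
  have h := foldl_inv s ((List.range s.length).filter (fun i => s.getD i 0 == 3)) [] s
    (fun i hi => (mem_all3 s i).mp hi) hbase
  simpa [weekends_to_holidays_py] using h

-- B's per-element condition agrees with connectivity to some 3
lemma B_elem (s : List Int) (k : Nat) (hk : k < s.length) :
    (connS s ((List.range s.length).filter (fun i => s.getD i 0 == 3)) k →
      (if s.getD k 0 = 2 then
        if (0 ≤ findL s ((k : Int) - 1) ∧ s.getD (findL s ((k : Int) - 1)).toNat 0 = 3)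
            ∨ (findR s (k+1) < s.length ∧ s.getD (findR s (k+1)) 0 = 3)
        then 3 else s.getD k 0
      else s.getD k 0) = 3)
    ∧ (¬ connS s ((List.range s.length).filter (fun i => s.getD i 0 == 3)) k →
      (if s.getD k 0 = 2 then
        if (0 ≤ findL s ((k : Int) - 1) ∧ s.getD (findL s ((k : Int) - 1)).toNat 0 = 3)
            ∨ (findR s (k+1) < s.length ∧ s.getD (findR s (k+1)) 0 = 3)
        then 3 else s.getD k 0
      else s.getD k 0) = s.getD k 0) := by
  by_cases h2 : s.getD k 0 = 2
  · constructor
    · rintro ⟨j, hjm, hcj⟩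
      rw [mem_all3] at hjm
      obtain ⟨-, hj3, hjlen, hd⟩ := hcj
      rw [if_pos h2, if_pos ?_]
      rcases hd with ⟨hjk, hb⟩ | ⟨hkj, hb⟩
      · -- j < k : findL lands exactly on j
        left
        have hf := findL_spec s ((k : Int) - 1)
        have hpin : findL s ((k : Int) - 1) = (j : Int) := by
          rcases lt_trichotomy (findL s ((k : Int) - 1)) (j : Int) with hlt | heq | hgt
          · have hj2 := hf.2.2 (j : Int) (by omega) hlt (by omega)
            simp only [Int.toNat_natCast] at hj2
            omega
          · exact heq
          · exfalso
            have h0 : 0 ≤ findL s ((k : Int) - 1) := by omega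
            have hne := hf.2.1 h0
            have hin : s.getD (findL s ((k : Int) - 1)).toNat 0 = 2 :=
              hb (findL s ((k : Int) - 1)).toNat (by omega) (by omega)
            exact hne hin
        rw [hpin]
        exact ⟨by omega, by simpa using hj3⟩
      · -- k < j : findR lands exactly on j
        right
        have hf := findR_spec s (k + 1)
        have hpin : findR s (k + 1) = j := by
          rcases lt_trichotomy (findR s (k + 1)) j with hlt | heq | hgt
          · exfalso
            have hne := hf.2.1 (by omega)
            exact hne (hb (findR s (k + 1)) (by omega) hlt)
          · exact heq
          · have := hf.2.2 j (by omega) hgt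
            omega
        rw [hpin]
        exact ⟨hjlen, hj3⟩
    · intro hnc
      rw [if_pos h2, if_neg ?_]
      rintro (⟨h0, h3l⟩ | ⟨hrn, h3r⟩)
      · have hf := findL_spec s ((k : Int) - 1)
        apply hnc
        have hjlen : (findL s ((k : Int) - 1)).toNat < s.length := by omega
        refine ⟨(findL s ((k : Int) - 1)).toNat, (mem_all3 s _).mpr ⟨hjlen, h3l⟩,
          h2, h3l, hjlen, Or.inl ⟨by omega, fun m hm1 hm2 => ?_⟩⟩
        have := hf.2.2 (m : Int) (by omega) (by omega) (by omega)
        simpa using this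
      · have hf := findR_spec s (k + 1)
        apply hnc
        refine ⟨findR s (k + 1), (mem_all3 s _).mpr ⟨hrn, h3r⟩,
          h2, h3r, hrn, Or.inr ⟨by omega, fun m hm1 hm2 => ?_⟩⟩
        exact hf.2.2 m (by omega) hm2
  · rw [if_neg h2]
    exact ⟨fun ⟨j, hjm, hcj⟩ => absurd hcj.1 h2, fun _ => rfl⟩

-- ===== VERDICT (by name: the statement is the Claim_ definition above) =====
theorem weekends_to_holidays_py_spec : Claim_equal_weekends_to_holidays_py := by
  intro status _
  unfold Spec_weekends_to_holidays_py
  have hA := A_inv status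
  have hlenA : (weekends_to_holidays_py status).length = status.length := hA.1
  have hlenB : (weekends_to_holidays_py_alt status).length = status.length := by
    simp [weekends_to_holidays_py_alt]
  apply List.ext_getElem (by omega)
  intro k hk1 hk2
  have hkn : k < status.length := by omega
  have hBval : (weekends_to_holidays_py_alt status)[k] =
      (if status.getD k 0 = 2 then
        if (0 ≤ findL status ((k : Int) - 1) ∧ status.getD (findL status ((k : Int) - 1)).toNat 0 = 3)
            ∨ (findR status (k+1) < status.length ∧ status.getD (findR status (k+1)) 0 = 3)
        then 3 else status.getD k 0
      else status.getD k 0) := by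
    simp [weekends_to_holidays_py_alt]
  have hAval : (weekends_to_holidays_py status)[k] = (weekends_to_holidays_py status).getD k 0 :=
    (List.getD_eq_getElem _ _ hk1).symm
  rw [hAval, hBval]
  have hB := B_elem status k hkn
  by_cases hc : connS status ((List.range status.length).filter (fun i => status.getD i 0 == 3)) k
  · rw [(hA.2 k).1 hc, hB.1 hc]
  · rw [(hA.2 k).2 hc, hB.2 hc]
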